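-- pv_equiv track=rewrite | github.com/dinoelT/DataPrepareScript | utils/decisions.py | decide_by_frequency
-- ===== SOURCE A (Python) =====
-- from typing import List, Dict
-- from collections import Counter
--
-- def decide_by_frequency(face_labels: List[Dict]):
--     all_features = {k for o in face_labels for k in list(o.keys())}
--
--     decided = {}
--     for feature in all_features:
--         labels = [o.get(feature) for o in face_labels]
--         most_common = Counter(filter(lambda x: x in ("Yes", "No", "Undef"), labels)).most_common()
--
--         # most_common = [('Yes', 2), ('No', 1)]
--         if len(most_common) == 0:
--             continue
--         elif len(most_common) == 1:
--             decided[feature] = most_common[0][0]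
--         else:
--             # Check if the experts are disagreeing
--             if most_common[0][1] > most_common[1][1]:
--                 decided[feature] = most_common[0][0]
--     return decided
-- ===== SOURCE B (Python) =====
-- def _bump(v, c):
--     y, n, u = c
--     if v == "Yes":
--         return (y + 1, n, u)
--     elif v == "No":
--         return (y, n + 1, u)
--     elif v == "Undef":
--         return (y, n, u + 1)
--     return c
--
-- def _pick(y, n, u):
--     top = max(y, max(n, u))
--     if top == 0 or (y == top) + (n == top) + (u == top) != 1:
--         return None
--     return "Yes" if y == top else ("No" if n == top else "Undef")
--
-- def decide_by_frequency(face_labels):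
--     # one pass over the objects: per-feature (yes, no, undef) counters,
--     # touching only the keys actually present in each object
--     counts = {}
--     for o in face_labels:
--         for k, v in o.items():
--             counts[k] = _bump(v, counts.get(k, (0, 0, 0)))
--     decided = {}
--     for k, c in counts.items():
--         lab = _pick(*c)
--         if lab is not None:
--             decided[k] = lab
--     return decided
-- ===== Notes on version B (the rewrite author's own statement) =====
-- stated objective: faster
-- what changed: A rescans the whole object list once per feature (building a filtered label list and a Counter per feature and sorting it); B makes a single pass over the objects, keeping one (yes,no,undef) counter triple per feature for the keys actually present, then picks the unique strict maximum per feature.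
import Mathlib
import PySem

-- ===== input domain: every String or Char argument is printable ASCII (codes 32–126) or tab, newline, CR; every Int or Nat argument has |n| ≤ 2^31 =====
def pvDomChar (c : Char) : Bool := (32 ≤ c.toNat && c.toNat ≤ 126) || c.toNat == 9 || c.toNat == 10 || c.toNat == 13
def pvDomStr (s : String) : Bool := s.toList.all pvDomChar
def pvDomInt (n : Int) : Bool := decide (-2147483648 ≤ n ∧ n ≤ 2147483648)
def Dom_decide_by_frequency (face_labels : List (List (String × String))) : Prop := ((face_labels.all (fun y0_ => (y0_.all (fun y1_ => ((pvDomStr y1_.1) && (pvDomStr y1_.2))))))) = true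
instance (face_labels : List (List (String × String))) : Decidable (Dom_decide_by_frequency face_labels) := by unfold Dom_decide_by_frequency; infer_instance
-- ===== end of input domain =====

-- B replaces A's per-feature rescan of all objects (O(F*N)) by a single pass over the objects
-- updating per-feature (yes, no, undef) counters; objective: faster.
-- Output order of the returned dict: A iterates a Python set (hash order), so only the dict's
-- key→value content is specified; both ports use first-occurrence order.

-- ===== PORT A =====
-- inner Python dicts are modelled via PySem.Dict.ofList (unique keys, insertion order);
-- most_common() is sorted(items, key=itemgetter(1), reverse=True);
-- filter(lambda x: x in ("Yes","No","Undef"), labels): survivors are exactly the `some v` with v in the triple,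
-- so the Counter over the filtered labels is a Counter over those strings (ported as filterMap).
def decide_by_frequency (face_labels : List (List (String × String))) : List (String × String) :=
  let all_features : PySem.Set String :=
    PySem.Set.ofList (face_labels.flatMap (fun o => (PySem.Dict.ofList o).keys))
  let decided : PySem.Dict String String :=
    all_features.foldl (fun decided feature =>
      let labels := face_labels.map (fun o => (PySem.Dict.ofList o).get? feature)
      let filtered := labels.filterMap (fun x =>
        match x with
        | some v => if v == "Yes" || v == "No" || v == "Undef" then some v else none
        | none => none)
      let most_common := PySem.List.sorted (PySem.Dict.counter filtered).items (fun p => p.2) true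
      match most_common with
      | [] => decided
      | [p] => decided.insert feature p.1
      | p :: q :: _ => if p.2 > q.2 then decided.insert feature p.1 else decided)
      PySem.Dict.empty
  decided.items

-- ===== PORT B =====
def pvBump (v : String) (c : Int × Int × Int) : Int × Int × Int :=
  if v == "Yes" then (c.1 + 1, c.2.1, c.2.2)
  else if v == "No" then (c.1, c.2.1 + 1, c.2.2)
  else if v == "Undef" then (c.1, c.2.1, c.2.2 + 1)
  else c

def pvPick (y n u : Int) : Option String :=
  let top := max y (max n u)
  if top = 0 ∨ ((if y = top then (1 : Int) else 0) + (if n = top then 1 else 0) + (if u = top then 1 else 0)) ≠ 1 then none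
  else if y = top then some "Yes" else if n = top then some "No" else some "Undef"

def decide_by_frequency_alt (face_labels : List (List (String × String))) : List (String × String) :=
  let counts : PySem.Dict String (Int × Int × Int) :=
    face_labels.foldl (fun counts o =>
      (PySem.Dict.ofList o).items.foldl (fun counts kv =>
        counts.insert kv.1 (pvBump kv.2 (counts.getD kv.1 (0, 0, 0)))) counts)
      PySem.Dict.empty
  let decided : PySem.Dict String String :=
    counts.items.foldl (fun decided p =>
      match pvPick p.2.1 p.2.2.1 p.2.2.2 with
      | some lab => decided.insert p.1 lab
      | none => decided) PySem.Dict.empty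
  decided.items

-- ===== PRECONDITION & SPEC =====
def Spec_decide_by_frequency (face_labels : List (List (String × String))) (out : List (String × String)) : Prop := out = decide_by_frequency_alt face_labels
instance (face_labels : List (List (String × String))) (out : List (String × String)) : Decidable (Spec_decide_by_frequency face_labels out) := by unfold Spec_decide_by_frequency; infer_instance

-- ===== CLAIM (what is proved, stated in full; the proofs are below) =====
def Claim_equal_decide_by_frequency : Prop := ∀ (face_labels : List (List (String × String))), Dom_decide_by_frequency face_labels → Spec_decide_by_frequency face_labels (decide_by_frequency face_labels)

-- ===== LEMMAS AND PROOFS =====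

-- the decision A's match makes, as a function of most_common
def pvMC (mc : List (String × Int)) : Option String :=
  match mc with
  | [] => none
  | [p] => some p.1
  | p :: q :: _ => if p.2 > q.2 then some p.1 else none

-- number of objects whose value at key k is v
def pvCnt (face_labels : List (List (String × String))) (k v : String) : Int :=
  ((face_labels.map (fun o => (PySem.Dict.ofList o).get? k)).count (some v) : Int)

-- A's per-feature filtered label list
def pvFiltered (face_labels : List (List (String × String))) (k : String) : List String :=
  (face_labels.map (fun o => (PySem.Dict.ofList o).get? k)).filterMap (fun x =>
    match x with
    | some v => if v == "Yes" || v == "No" || v == "Undef" then some v else none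
    | none => none)

theorem pv_mc_shape {α : Type} (d : α) (f : String → α) (mc : List (String × Int)) :
    (match mc with
     | [] => d
     | [p] => f p.1
     | p :: q :: _ => if p.2 > q.2 then f p.1 else d)
    = (match pvMC mc with | some lab => f lab | none => d) := by
  rcases mc with _ | ⟨p, _ | ⟨q, rest⟩⟩ <;> simp [pvMC] <;> split_ifs <;> rfl

-- inner fold leaves untouched keys alone
theorem pv_inner_getD_of_not_mem (l : List (String × String))
    (d : PySem.Dict String (Int × Int × Int)) (k : String) (hk : k ∉ l.map Prod.fst) :
    (l.foldl (fun c kv => c.insert kv.1 (pvBump kv.2 (c.getD kv.1 (0, 0, 0)))) d).getD k (0, 0, 0)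
      = d.getD k (0, 0, 0) := by
  induction l generalizing d with
  | nil => rfl
  | cons kv tl ih =>
      simp only [List.map_cons, List.mem_cons, not_or] at hk
      rw [List.foldl_cons, ih _ hk.2, PySem.Dict.getD_insert_of_ne _ _ _ hk.1]

theorem pv_inner_getD_of_mem (l : List (String × String))
    (d : PySem.Dict String (Int × Int × Int)) (k : String) (v : String)
    (hnd : (l.map Prod.fst).Nodup) (hm : (k, v) ∈ l) :
    (l.foldl (fun c kv => c.insert kv.1 (pvBump kv.2 (c.getD kv.1 (0, 0, 0)))) d).getD k (0, 0, 0)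
      = pvBump v (d.getD k (0, 0, 0)) := by
  induction l generalizing d with
  | nil => simp at hm
  | cons kv tl ih =>
      simp only [List.map_cons, List.nodup_cons] at hnd
      rcases List.mem_cons.mp hm with h | h
      · subst h
        rw [List.foldl_cons, pv_inner_getD_of_not_mem _ _ _ hnd.1,
          PySem.Dict.getD_insert_self]
      · have hne : k ≠ kv.1 := by
          rintro rfl
          exact hnd.1 (List.mem_map.mpr ⟨_, h, rfl⟩)
        rw [List.foldl_cons, ih _ hnd.2 h, PySem.Dict.getD_insert_of_ne _ _ _ hne]

-- the outer fold's counters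
theorem pv_counts_getD (face_labels : List (List (String × String)))
    (d : PySem.Dict String (Int × Int × Int)) (k : String) :
    (face_labels.foldl (fun counts o =>
        (PySem.Dict.ofList o).items.foldl (fun counts kv =>
          counts.insert kv.1 (pvBump kv.2 (counts.getD kv.1 (0, 0, 0)))) counts) d).getD k (0, 0, 0)
      = ((d.getD k (0, 0, 0)).1 + pvCnt face_labels k "Yes",
         (d.getD k (0, 0, 0)).2.1 + pvCnt face_labels k "No",
         (d.getD k (0, 0, 0)).2.2 + pvCnt face_labels k "Undef") := by
  induction face_labels generalizing d with
  | nil => simp [pvCnt]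
  | cons o tl ih =>
      rw [List.foldl_cons, ih]
      have hkeys : (PySem.Dict.ofList o).items.map Prod.fst = (PySem.Dict.ofList o).keys := rfl
      have hcnt : ∀ v : String, pvCnt (o :: tl) k v
          = (if (PySem.Dict.ofList o).get? k = some v then 1 else 0) + pvCnt tl k v := by
        intro v
        by_cases h : (PySem.Dict.ofList o).get? k = some v <;>
          simp [pvCnt, List.count_cons, h] <;> push_cast <;> ring
      cases hk : (PySem.Dict.ofList o).get? k with
      | none =>
          have hnm : k ∉ (PySem.Dict.ofList o).items.map Prod.fst := by
            rw [hkeys]; exact (PySem.Dict.get?_eq_none_iff_not_mem_keys _ _).mp hk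
          rw [pv_inner_getD_of_not_mem _ _ _ hnm]
          simp [hcnt, hk]
      | some v =>
          have hnd : ((PySem.Dict.ofList o).items.map Prod.fst).Nodup := by
            rw [hkeys]; exact PySem.Dict.nodup_keys_ofList o
          rw [pv_inner_getD_of_mem _ _ _ v hnd (PySem.Dict.mem_items_of_get?_eq_some _ hk)]
          simp only [hcnt, hk]
          by_cases h1 : v = "Yes" <;> by_cases h2 : v = "No" <;> by_cases h3 : v = "Undef" <;>
            simp [pvBump, h1, h2, h3, Prod.ext_iff] <;> omega

theorem pv_counts_keys (face_labels : List (List (String × String)))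
    (d : PySem.Dict String (Int × Int × Int)) :
    (face_labels.foldl (fun counts o =>
        (PySem.Dict.ofList o).items.foldl (fun counts kv =>
          counts.insert kv.1 (pvBump kv.2 (counts.getD kv.1 (0, 0, 0)))) counts) d).keys
      = PySem.Set.update d.keys (face_labels.flatMap (fun o => (PySem.Dict.ofList o).keys)) := by
  induction face_labels generalizing d with
  | nil => simp [PySem.Set.update]
  | cons o tl ih =>
      rw [List.foldl_cons, ih, PySem.Dict.keys_foldl_insert_key]
      simp [PySem.Dict.keys, PySem.Set.update, List.foldl_append]

theorem pv_counts_keys_nodup (face_labels : List (List (String × String)))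
    (d : PySem.Dict String (Int × Int × Int)) (h : d.keys.Nodup) :
    (face_labels.foldl (fun counts o =>
        (PySem.Dict.ofList o).items.foldl (fun counts kv =>
          counts.insert kv.1 (pvBump kv.2 (counts.getD kv.1 (0, 0, 0)))) counts) d).keys.Nodup := by
  induction face_labels generalizing d with
  | nil => exact h
  | cons o tl ih =>
      rw [List.foldl_cons]
      exact ih _ (PySem.Dict.nodup_keys_foldl_insert_key _ _ _ _ h)

-- counting in the filtered list
theorem pv_filtered_count (face_labels : List (List (String × String))) (k v : String)
    (hv : (v == "Yes" || v == "No" || v == "Undef") = true) :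
    ((pvFiltered face_labels k).count v : Int) = pvCnt face_labels k v := by
  have aux : ∀ L : List (Option String),
      (L.filterMap (fun x => match x with
        | some w => if w == "Yes" || w == "No" || w == "Undef" then some w else none
        | none => none)).count v = L.count (some v) := by
    intro L
    induction L with
    | nil => rfl
    | cons x tl ih =>
        cases x with
        | none =>
            rw [List.filterMap_cons_none rfl, ih]
            simp [List.count_cons]
        | some w =>
            by_cases hw : (w == "Yes" || w == "No" || w == "Undef") = true
            · rw [List.filterMap_cons_some (b := w) (by simp [hw])]
              simp only [List.count_cons, ih]
              by_cases hwv : w = v <;> simp [hwv]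
            · have hne : w ≠ v := by rintro rfl; exact hw hv
              rw [List.filterMap_cons_none (by simp [hw]), ih]
              simp [List.count_cons, hne]
  unfold pvFiltered pvCnt
  rw [aux]

theorem pv_filtered_mem (face_labels : List (List (String × String))) (k x : String)
    (hx : x ∈ pvFiltered face_labels k) : x = "Yes" ∨ x = "No" ∨ x = "Undef" := by
  unfold pvFiltered at hx
  rcases List.mem_filterMap.mp hx with ⟨a, _, hfa⟩
  rcases a with _ | w
  · simp at hfa
  · by_cases hw : (w == "Yes" || w == "No" || w == "Undef") = true
    · simp only [hw, if_pos] at hfa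
      cases hfa
      simpa [or_assoc] using hw
    · simp [hw] at hfa

-- pvPick with its local `top` zeta-expanded, for rewriting
theorem pvPick_eq (y n u : Int) : pvPick y n u =
    if max y (max n u) = 0 ∨ ((if y = max y (max n u) then (1 : Int) else 0)
        + (if n = max y (max n u) then 1 else 0)
        + (if u = max y (max n u) then 1 else 0)) ≠ 1 then none
    else if y = max y (max n u) then some "Yes"
    else if n = max y (max n u) then some "No"
    else some "Undef" := rfl

theorem pvPick_cases (y n u : Int) (h0y : 0 ≤ y) (h0n : 0 ≤ n) (h0u : 0 ≤ u) :
    pvPick y n u = if n < y ∧ u < y then some "Yes"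
      else if y < n ∧ u < n then some "No"
      else if y < u ∧ n < u then some "Undef"
      else none := by
  simp only [pvPick_eq, max_def]
  split_ifs <;> first | rfl | (exfalso; omega)

theorem pv_mc0 : pvMC (PySem.List.sorted ([] : List (String × Int)) (fun p => p.2) true) = none := rfl

theorem pv_mc1 (a : String) (x : Int) :
    pvMC (PySem.List.sorted [(a, x)] (fun p => p.2) true) = some a := rfl

theorem pv_mc2 (a b : String) (x y : Int) :
    pvMC (PySem.List.sorted [(a, x), (b, y)] (fun p => p.2) true)
      = if x < y then some b else if y < x then some a else none := by
  simp only [PySem.List.sorted, PySem.List.insertBy, List.foldl_cons, List.foldl_nil,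
    reduceIte, decide_eq_true_eq]
  split_ifs <;> simp only [pvMC] <;> (try split_ifs) <;> first | rfl | (exfalso; omega)

theorem pv_mc3 (a b c : String) (x y z : Int) :
    pvMC (PySem.List.sorted [(a, x), (b, y), (c, z)] (fun p => p.2) true)
      = if y < x ∧ z < x then some a
        else if x < y ∧ z < y then some b
        else if x < z ∧ y < z then some c
        else none := by
  simp only [PySem.List.sorted, PySem.List.insertBy, List.foldl_cons, List.foldl_nil,
    reduceIte, decide_eq_true_eq]
  split_ifs <;>
    (try simp only [PySem.List.insertBy, reduceIte, decide_eq_true_eq]) <;>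
    (try split_ifs) <;>
    simp only [pvMC] <;>
    (try split_ifs) <;>
    first | rfl | (exfalso; omega)

theorem pv_central_core (f : String → Int) (S : List String) (hnd : S.Nodup)
    (hsub : ∀ x ∈ S, x = "Yes" ∨ x = "No" ∨ x = "Undef")
    (h0 : ∀ x, 0 ≤ f x)
    (hy : 0 < f "Yes" ↔ "Yes" ∈ S) (hn : 0 < f "No" ↔ "No" ∈ S)
    (hu : 0 < f "Undef" ↔ "Undef" ∈ S) :
    pvMC (PySem.List.sorted (S.map (fun k => (k, f k))) (fun p => p.2) true)
      = pvPick (f "Yes") (f "No") (f "Undef") := by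
  rw [pvPick_cases _ _ _ (h0 "Yes") (h0 "No") (h0 "Undef")]
  have h0y := h0 "Yes"; have h0n := h0 "No"; have h0u := h0 "Undef"
  rcases S with _ | ⟨a, _ | ⟨b, _ | ⟨c, _ | ⟨d, rest⟩⟩⟩⟩
  · simp at hy hn hu
    rw [List.map_nil, pv_mc0]
    split_ifs <;> first | rfl | (exfalso; omega)
  · have ha := hsub a (by simp)
    rcases ha with rfl | rfl | rfl <;>
      (simp only [List.mem_cons, List.not_mem_nil, String.reduceEq, or_false, false_or,
         or_true, true_or, iff_true, iff_false, not_lt] at hy hn hu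
       simp only [List.map_cons, List.map_nil]
       rw [pv_mc1]
       split_ifs <;> first | rfl | (exfalso; omega))
  · have hab : a ≠ b := by simpa using (List.nodup_cons.mp hnd).1
    have ha := hsub a (by simp); have hb := hsub b (by simp)
    rcases ha with rfl | rfl | rfl <;> rcases hb with rfl | rfl | rfl <;>
      first
      | (exact absurd rfl hab)
      | (simp only [List.mem_cons, List.not_mem_nil, String.reduceEq, or_false, false_or,
           or_true, true_or, iff_true, iff_false, not_lt] at hy hn hu
         simp only [List.map_cons, List.map_nil]
         rw [pv_mc2]
         split_ifs <;> first | rfl | (exfalso; omega))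
  · have h1 := List.nodup_cons.mp hnd
    have hab : a ≠ b ∧ a ≠ c := by simpa [not_or] using h1.1
    have hbc : b ≠ c := by simpa using (List.nodup_cons.mp h1.2).1
    have ha := hsub a (by simp); have hb := hsub b (by simp); have hc := hsub c (by simp)
    rcases ha with rfl | rfl | rfl <;> rcases hb with rfl | rfl | rfl <;>
        rcases hc with rfl | rfl | rfl <;>
      first
      | (exact absurd rfl hab.1)
      | (exact absurd rfl hab.2)
      | (exact absurd rfl hbc)
      | (simp only [List.mem_cons, List.not_mem_nil, String.reduceEq, or_false, false_or,
           or_true, true_or, iff_true, iff_false, not_lt] at hy hn hu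
         simp only [List.map_cons, List.map_nil]
         rw [pv_mc3]
         all_goals ((try split_ifs) <;> first | rfl | (exfalso; omega)))
  · exfalso
    have hsubf : (a :: b :: c :: d :: rest).toFinset ⊆ ({"Yes", "No", "Undef"} : Finset String) := by
      intro x hx
      rcases hsub x (by simpa using hx) with rfl | rfl | rfl <;> simp
    have hcard := Finset.card_le_card hsubf
    rw [List.toFinset_card_of_nodup hnd] at hcard
    have h3 : ({"Yes", "No", "Undef"} : Finset String).card ≤ 3 := by decide
    simp only [List.length_cons] at hcard
    omega

-- the central per-feature lemma: A's most_common decision = B's counter decision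
theorem pv_central (l : List String) (h : ∀ x ∈ l, x = "Yes" ∨ x = "No" ∨ x = "Undef") :
    pvMC (PySem.List.sorted (PySem.Dict.counter l).items (fun p => p.2) true)
      = pvPick (l.count "Yes") (l.count "No") (l.count "Undef") := by
  rw [PySem.Dict.items_counter]
  refine pv_central_core (fun k => ((l.count k : Nat) : Int)) _ (PySem.Set.nodup_ofList l)
    (fun x hx => h x ((PySem.Set.mem_ofList ..).mp hx)) (fun x => Int.natCast_nonneg _)
    ?_ ?_ ?_ <;>
    simp only [Int.natCast_pos, PySem.Set.mem_ofList, List.count_pos_iff]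

-- ===== VERDICT (by name: the statement is the Claim_ definition above) =====
theorem decide_by_frequency_spec : Claim_equal_decide_by_frequency := by
  intro fl _
  unfold Spec_decide_by_frequency
  have hA : decide_by_frequency fl
      = ((PySem.Set.ofList (fl.flatMap (fun o => (PySem.Dict.ofList o).keys))).foldl
          (fun decided feature =>
            match PySem.List.sorted
                (PySem.Dict.counter (pvFiltered fl feature)).items (fun p => p.2) true with
            | [] => decided
            | [p] => decided.insert feature p.1
            | p :: q :: _ => if p.2 > q.2 then decided.insert feature p.1 else decided)
          PySem.Dict.empty).items := rfl
  have hB : decide_by_frequency_alt fl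
      = ((fl.foldl (fun counts o =>
            (PySem.Dict.ofList o).items.foldl (fun counts kv =>
              counts.insert kv.1 (pvBump kv.2 (counts.getD kv.1 (0, 0, 0)))) counts)
            PySem.Dict.empty).items.foldl
          (fun decided p =>
            match pvPick p.2.1 p.2.2.1 p.2.2.2 with
            | some lab => decided.insert p.1 lab
            | none => decided) PySem.Dict.empty).items := rfl
  rw [hA, hB]
  have hnodup : (fl.foldl (fun counts o =>
      (PySem.Dict.ofList o).items.foldl (fun counts kv =>
        counts.insert kv.1 (pvBump kv.2 (counts.getD kv.1 (0, 0, 0)))) counts)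
      PySem.Dict.empty).keys.Nodup :=
    pv_counts_keys_nodup fl PySem.Dict.empty (by simp [PySem.Dict.keys_empty])
  rw [PySem.Dict.items_eq_map_keys _ hnodup (0, 0, 0), List.foldl_map, pv_counts_keys]
  have hfeats : PySem.Set.update (PySem.Dict.empty : PySem.Dict String (Int × Int × Int)).keys
      (fl.flatMap (fun o => (PySem.Dict.ofList o).keys))
      = PySem.Set.ofList (fl.flatMap (fun o => (PySem.Dict.ofList o).keys)) := by
    simp [PySem.Set.update, PySem.Set.ofList_eq_foldl, PySem.Dict.keys_empty]
  rw [hfeats]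
  refine congrArg PySem.Dict.items ?_
  apply PySem.List.foldl_congr_mem
  intro acc k hk
  rw [pv_mc_shape acc (fun lab => acc.insert k lab)]
  have hc := pv_counts_getD fl PySem.Dict.empty k
  rw [PySem.Dict.getD_empty] at hc
  simp only [zero_add] at hc
  rw [hc]
  rw [pv_central (pvFiltered fl k) (pv_filtered_mem fl k),
    pv_filtered_count fl k "Yes" (by decide), pv_filtered_count fl k "No" (by decide),
    pv_filtered_count fl k "Undef" (by decide)]
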